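-- pv_equiv track=rewrite | github.com/evh0106/IronSyncroWealth | koreainvestment/src/ranking/ranking.py | _select_columns
-- ===== SOURCE A (Python) =====
-- from typing import Any
--
-- def _select_columns(rows: list[dict[str, Any]]) -> list[str]:
--     if not rows:
--         return []
--
--     preferred = [
--         "data_rank",
--         "mksc_shrn_iscd",
--         "stck_shrn_iscd",
--         "hts_kor_isnm",
--         "stck_prpr",
--         "prdy_ctrt",
--         "acml_vol",
--         "bstp_kor_isnm",
--         "ovtm_untp_antc_cnqn",
--     ]
--
--     keys = list(rows[0].keys())
--     columns = [k for k in preferred if k in keys]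
--     for key in keys:
--         if key not in columns:
--             columns.append(key)
--     return columns[:8]
-- ===== SOURCE B (Python) =====
-- def _take_matching(items, pred, limit):
--     if limit == 0 or not items:
--         return []
--     x, rest = items[0], items[1:]
--     if pred(x):
--         return [x] + _take_matching(rest, pred, limit - 1)
--     return _take_matching(rest, pred, limit)
--
--
-- def _select_columns(rows):
--     if not rows:
--         return []
--
--     preferred = [
--         "data_rank",
--         "mksc_shrn_iscd",
--         "stck_shrn_iscd",
--         "hts_kor_isnm",
--         "stck_prpr",
--         "prdy_ctrt",
--         "acml_vol",
--         "bstp_kor_isnm",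
--         "ovtm_untp_antc_cnqn",
--     ]
--     keys = list(rows[0].keys())
--     head = _take_matching(preferred, lambda name: name in keys, 8)
--     tail = _take_matching(keys, lambda k: k not in preferred, 8 - len(head))
--     return head + tail
-- ===== Notes on version B (the rewrite author's own statement) =====
-- stated objective: alternative
-- what changed: Replaces A's filter-then-append-with-membership-scans passes by a recursive bounded collector that takes at most 8 matching preferred names and then fills the remaining budget with non-preferred keys, so no full intersection/append lists or final slice are built.
import Mathlib
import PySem

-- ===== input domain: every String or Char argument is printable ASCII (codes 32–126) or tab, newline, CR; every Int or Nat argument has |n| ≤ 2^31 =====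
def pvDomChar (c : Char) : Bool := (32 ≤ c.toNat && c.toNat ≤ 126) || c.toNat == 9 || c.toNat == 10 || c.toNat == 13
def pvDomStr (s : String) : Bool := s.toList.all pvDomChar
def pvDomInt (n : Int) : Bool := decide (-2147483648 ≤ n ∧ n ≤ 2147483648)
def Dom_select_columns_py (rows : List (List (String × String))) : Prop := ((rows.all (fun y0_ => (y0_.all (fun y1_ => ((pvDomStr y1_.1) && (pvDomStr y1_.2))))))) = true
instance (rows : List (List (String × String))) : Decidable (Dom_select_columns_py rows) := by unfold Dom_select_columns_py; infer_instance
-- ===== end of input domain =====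

-- B replaces A's filter-then-append passes and final [:8] slice by a recursive bounded
-- collector with an explicit budget (alternative decomposition; return-value equality proved).


-- ===== PORT A =====
def select_columns_py (rows : List (List (String × String))) : List String :=
  match rows with
  | [] => []
  | r0 :: _ =>
    let preferred : List String :=
      ["data_rank", "mksc_shrn_iscd", "stck_shrn_iscd", "hts_kor_isnm", "stck_prpr",
       "prdy_ctrt", "acml_vol", "bstp_kor_isnm", "ovtm_untp_antc_cnqn"]
    let keys := (PySem.Dict.ofList r0).keys
    let columns0 := preferred.filter (fun k => keys.contains k)
    let columns := keys.foldl (fun cols key => if cols.contains key then cols else cols ++ [key]) columns0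
    PySem.List.slice columns none (some 8)

-- ===== PORT B =====
-- port of Source B's recursive _take_matching (limit is always a nonnegative count there)
def pvTakeMatching (items : List String) (pred : String → Bool) (limit : Nat) : List String :=
  match limit, items with
  | 0, _ => []
  | _, [] => []
  | Nat.succ m, x :: rest =>
    if pred x then x :: pvTakeMatching rest pred m else pvTakeMatching rest pred (Nat.succ m)

def select_columns_py_alt (rows : List (List (String × String))) : List String :=
  match rows with
  | [] => []
  | r0 :: _ =>
    let preferred : List String :=
      ["data_rank", "mksc_shrn_iscd", "stck_shrn_iscd", "hts_kor_isnm", "stck_prpr",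
       "prdy_ctrt", "acml_vol", "bstp_kor_isnm", "ovtm_untp_antc_cnqn"]
    let keys := (PySem.Dict.ofList r0).keys
    let head := pvTakeMatching preferred (fun name => keys.contains name) 8
    let tail := pvTakeMatching keys (fun k => !preferred.contains k) (8 - head.length)
    head ++ tail

-- ===== PRECONDITION & SPEC =====
def Spec_select_columns_py (rows : List (List (String × String))) (out : List String) : Prop := out = select_columns_py_alt rows
instance (rows : List (List (String × String))) (out : List String) : Decidable (Spec_select_columns_py rows out) := by unfold Spec_select_columns_py; infer_instance

-- ===== CLAIM =====
def Claim_equal_select_columns_py : Prop := ∀ (rows : List (List (String × String))), Dom_select_columns_py rows → Spec_select_columns_py rows (select_columns_py rows)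

-- ===== LEMMAS AND PROOFS =====

-- the bounded collector is take-of-filter
theorem pvTakeMatching_eq_take_filter (items : List String) (pred : String → Bool) :
    ∀ n, pvTakeMatching items pred n = (items.filter pred).take n := by
  induction items with
  | nil => intro n; cases n <;> rfl
  | cons x rest ih =>
    intro n
    cases n with
    | zero => rfl
    | succ m =>
      by_cases h : pred x = true
      · simp [pvTakeMatching, h, ih]
      · have h' : pred x = false := by simpa using h
        simp [pvTakeMatching, h', ih]

-- A's append loop appends exactly the keys not already present
theorem pv_append_loop : ∀ (ks acc : List String), ks.Nodup →
    ks.foldl (fun cols key => if cols.contains key then cols else cols ++ [key]) acc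
      = acc ++ ks.filter (fun k => !acc.contains k) := by
  intro ks
  induction ks with
  | nil => simp
  | cons k ks ih =>
    intro acc hnd
    have hkks : k ∉ ks := (List.nodup_cons.mp hnd).1
    have hnd' : ks.Nodup := (List.nodup_cons.mp hnd).2
    by_cases hk : acc.contains k = true
    · have hmem : k ∈ acc := by simpa using hk
      rw [List.foldl_cons, if_pos hk, ih acc hnd']
      simp [hmem]
    · have hk' : acc.contains k = false := by simpa using hk
      have hknacc : k ∉ acc := by simpa using hk'
      rw [List.foldl_cons, if_neg hk, ih (acc ++ [k]) hnd']
      have : ks.filter (fun kk => !(acc ++ [k]).contains kk) = ks.filter (fun kk => !acc.contains kk) := by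
        apply List.filter_congr; intro q hq
        have : q ≠ k := fun h => hkks (h ▸ hq)
        simp [this]
      rw [this]
      simp [hknacc]

-- ===== VERDICT =====
theorem select_columns_py_spec : Claim_equal_select_columns_py := by
  intro rows _
  unfold Spec_select_columns_py
  cases rows with
  | nil => rfl
  | cons r0 rest =>
    have hnd : ((PySem.Dict.ofList r0).keys).Nodup := PySem.Dict.nodup_keys_ofList r0
    show PySem.List.slice
        (((PySem.Dict.ofList r0).keys).foldl
            (fun cols key => if cols.contains key then cols else cols ++ [key])
            (["data_rank", "mksc_shrn_iscd", "stck_shrn_iscd", "hts_kor_isnm", "stck_prpr",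
              "prdy_ctrt", "acml_vol", "bstp_kor_isnm", "ovtm_untp_antc_cnqn"].filter
                (fun k => ((PySem.Dict.ofList r0).keys).contains k)))
        none (some 8)
      = pvTakeMatching ["data_rank", "mksc_shrn_iscd", "stck_shrn_iscd", "hts_kor_isnm", "stck_prpr",
              "prdy_ctrt", "acml_vol", "bstp_kor_isnm", "ovtm_untp_antc_cnqn"]
          (fun name => ((PySem.Dict.ofList r0).keys).contains name) 8
        ++ pvTakeMatching ((PySem.Dict.ofList r0).keys)
            (fun k => !(["data_rank", "mksc_shrn_iscd", "stck_shrn_iscd", "hts_kor_isnm", "stck_prpr",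
              "prdy_ctrt", "acml_vol", "bstp_kor_isnm", "ovtm_untp_antc_cnqn"] : List String).contains k)
            (8 - (pvTakeMatching ["data_rank", "mksc_shrn_iscd", "stck_shrn_iscd", "hts_kor_isnm", "stck_prpr",
              "prdy_ctrt", "acml_vol", "bstp_kor_isnm", "ovtm_untp_antc_cnqn"]
                (fun name => ((PySem.Dict.ofList r0).keys).contains name) 8).length)
    set keys := (PySem.Dict.ofList r0).keys with hkeys
    set P : List String := ["data_rank", "mksc_shrn_iscd", "stck_shrn_iscd", "hts_kor_isnm", "stck_prpr",
              "prdy_ctrt", "acml_vol", "bstp_kor_isnm", "ovtm_untp_antc_cnqn"] with hP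
    have hfilters :
        keys.filter (fun k => !(P.filter (fun p => keys.contains p)).contains k)
          = keys.filter (fun k => !P.contains k) := by
      apply List.filter_congr
      intro q hq
      by_cases hqp : q ∈ P <;> simp [List.mem_filter, hqp, hq]
    rw [pv_append_loop keys _ hnd, hfilters,
      pvTakeMatching_eq_take_filter, pvTakeMatching_eq_take_filter]
    have h8 : PySem.List.slice
        (P.filter (fun k => keys.contains k) ++ keys.filter (fun k => !P.contains k)) none (some 8)
        = (P.filter (fun k => keys.contains k) ++ keys.filter (fun k => !P.contains k)).take 8 := by
      simpa using PySem.List.slice_to_natCast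
        (P.filter (fun k => keys.contains k) ++ keys.filter (fun k => !P.contains k)) 8
    rw [h8, List.take_append]
    congr 1
    have : ((P.filter (fun k => keys.contains k)).take 8).length
        = min 8 (P.filter (fun k => keys.contains k)).length := by simp
    rw [this]
    congr 1
    omega
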